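-- pv_equiv track=rewrite | github.com/yourjelly/odoo | addons/account/models/test.py | get_account_type_value_at_level
-- ===== SOURCE A (Python) =====
-- ACCOUNT_TYPE_HIERARCHY = {
--     ('equity', "Equity"): [
--         ('equity', "Equity"),
--         ('current_year_earnings', "Current Year Earnings"),
--     ],
--     ('asset', "Assets"): {
--         ('current_assets', "Current Assets"): [
--             ('liquidity', "Bank and Cash"),
--             ('prepayments', "Prepayments"),
--             ('receivable', "Receivable"),
--         ],
--         ('non_current_assets', "Non Current Assets"): [
--             ('fixed_assets', "Fixed Assets"),
--         ],
--     },
--     ('liability', "Liabilities"): [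
--         ('payable', "Payable"),
--         ('current_liabilities', "Current Liabilities"),
--         ('non_current_liabilities', "Non-current Liabilities"),
--         ('credit_card', "Credit Card"),
--     ],
--     ('income', "Income"): [
--         ('revenue', "Revenue"),
--         ('other_income', "Other Income"),
--     ],
--     ('expense', "Expense"): [
--         ('expenses', "Expenses"),
--         ('depreciation', "Depreciation"),
--         ('cost_of_revenue', "Cost of Revenue"),
--     ],
--     ('off_balance', "Off Balance"): [],
-- }
--
-- def get_account_type_value_at_level(level):
--     def iterate(parent_value, node, node_level, result):
--         if node_level == level:
--             valid_values = []
--             for item in node: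
--                 valid_values.append(item[0])
--             if valid_values:
--                 result[parent_value] = valid_values
--         elif isinstance(node, dict):
--             for value, sub_node in node.items():
--                 iterate(value[0], sub_node, node_level + 1, result)
--
--     result = {}
--     iterate(None, ACCOUNT_TYPE_HIERARCHY, 0, result)
--     return result
-- ===== SOURCE B (Python) =====
-- ACCOUNT_TYPE_HIERARCHY = {
--     ('equity', "Equity"): [
--         ('equity', "Equity"),
--         ('current_year_earnings', "Current Year Earnings"),
--     ],
--     ('asset', "Assets"): {
--         ('current_assets', "Current Assets"): [
--             ('liquidity', "Bank and Cash"),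
--             ('prepayments', "Prepayments"),
--             ('receivable', "Receivable"),
--         ],
--         ('non_current_assets', "Non Current Assets"): [
--             ('fixed_assets', "Fixed Assets"),
--         ],
--     },
--     ('liability', "Liabilities"): [
--         ('payable', "Payable"),
--         ('current_liabilities', "Current Liabilities"),
--         ('non_current_liabilities', "Non-current Liabilities"),
--         ('credit_card', "Credit Card"),
--     ],
--     ('income', "Income"): [
--         ('revenue', "Revenue"),
--         ('other_income', "Other Income"),
--     ],
--     ('expense', "Expense"): [
--         ('expenses', "Expenses"),
--         ('depreciation', "Depreciation"),
--         ('cost_of_revenue', "Cost of Revenue"),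
--     ],
--     ('off_balance', "Off Balance"): [],
-- }
--
--
-- def get_account_type_value_at_level(level):
--     if level < 0:
--         return {}
--     # iterative level-by-level descent instead of recursion
--     frontier = [(None, ACCOUNT_TYPE_HIERARCHY)]
--     depth = 0
--     while frontier and depth < level:
--         new_frontier = []
--         for _parent, node in frontier:
--             if isinstance(node, dict):
--                 for value, sub_node in node.items():
--                     new_frontier.append((value[0], sub_node))
--         frontier = new_frontier
--         depth += 1
--     result = {}
--     for parent, node in frontier:
--         values = [item[0] for item in node]
--         if values:
--             result[parent] = values
--     return result
-- ===== Notes on version B (the rewrite author's own statement) =====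
-- stated objective: alternative
-- what changed: Replaces the recursive helper mutating a result dict with an iterative breadth-first descent: a frontier of (parent, node) pairs is expanded level times, then the values are collected from the final frontier in one pass.
import Mathlib
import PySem

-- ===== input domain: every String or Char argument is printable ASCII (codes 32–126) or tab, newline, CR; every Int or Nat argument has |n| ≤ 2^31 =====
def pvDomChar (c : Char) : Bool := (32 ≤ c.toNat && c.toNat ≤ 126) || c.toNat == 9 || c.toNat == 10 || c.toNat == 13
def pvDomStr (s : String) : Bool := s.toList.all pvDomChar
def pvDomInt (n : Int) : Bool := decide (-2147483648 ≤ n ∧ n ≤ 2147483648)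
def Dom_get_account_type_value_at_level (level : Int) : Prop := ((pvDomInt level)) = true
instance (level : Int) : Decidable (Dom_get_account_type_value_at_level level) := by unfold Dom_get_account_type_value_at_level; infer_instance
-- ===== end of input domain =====

-- B replaces A's recursive result-mutating helper by an iterative level-by-level frontier descent (same cost, different decomposition).

-- A JSON-like tree for ACCOUNT_TYPE_HIERARCHY: a node is either a list of (value, label)
-- pairs or a dict from (value, label) keys to sub-nodes (mutual pair: no nested inductive).
mutual
inductive PNode where
  | lst : List (String × String) → PNode
  | dct : PEntries → PNode
inductive PEntries where
  | nil : PEntries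
  | cons : (String × String) → PNode → PEntries → PEntries
end

def assetNode : PNode := .dct (
  .cons ("current_assets", "Current Assets") (.lst [("liquidity", "Bank and Cash"), ("prepayments", "Prepayments"), ("receivable", "Receivable")]) (
  .cons ("non_current_assets", "Non Current Assets") (.lst [("fixed_assets", "Fixed Assets")])
  .nil))

def hierarchy : PNode := .dct (
  .cons ("equity", "Equity") (.lst [("equity", "Equity"), ("current_year_earnings", "Current Year Earnings")]) (
  .cons ("asset", "Assets") assetNode (
  .cons ("liability", "Liabilities") (.lst [("payable", "Payable"), ("current_liabilities", "Current Liabilities"), ("non_current_liabilities", "Non-current Liabilities"), ("credit_card", "Credit Card")]) (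
  .cons ("income", "Income") (.lst [("revenue", "Revenue"), ("other_income", "Other Income")]) (
  .cons ("expense", "Expense") (.lst [("expenses", "Expenses"), ("depreciation", "Depreciation"), ("cost_of_revenue", "Cost of Revenue")]) (
  .cons ("off_balance", "Off Balance") (.lst [])
  .nil))))))

-- ===== PORT A =====
-- "for item in node: valid_values.append(item[0])": iterating a list yields its pairs,
-- iterating a dict yields its keys (pairs); item[0] is the pair's first component.
def headsA : PNode → List String
  | .lst items => items.map (·.1)
  | .dct es => headsAEntries es
where headsAEntries : PEntries → List String
  | .nil => []
  | .cons k _ rest => k.1 :: headsAEntries rest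

-- The recursive helper `iterate`; the result dict is threaded through.
-- Python's top-level parent is None (not a String); Pre_ excludes level = 0, the only
-- input on which that parent is ever used as a key, so "" stands in for it here.
mutual
def iterateA (parent : String) (node : PNode) (node_level level : Int)
    (result : PySem.Dict String (List String)) : PySem.Dict String (List String) :=
  if node_level = level then
    let valid_values := headsA node
    if valid_values.isEmpty then result else result.insert parent valid_values
  else
    match node with
    | .lst _ => result
    | .dct es => iterateAEntries es (node_level + 1) level result
def iterateAEntries (es : PEntries) (node_level level : Int)
    (result : PySem.Dict String (List String)) : PySem.Dict String (List String) :=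
  match es with
  | .nil => result
  | .cons value sub_node rest =>
      iterateAEntries rest node_level level (iterateA value.1 sub_node node_level level result)
end

def get_account_type_value_at_level (level : Int) : List (String × List String) :=
  (iterateA "" hierarchy 0 level PySem.Dict.empty).items

-- ===== PORT B =====
def headsB : PNode → List String
  | .lst items => items.map (·.1)
  | .dct es => headsBEntries es
where headsBEntries : PEntries → List String
  | .nil => []
  | .cons k _ rest => k.1 :: headsBEntries rest

def childPairs : PEntries → List (String × PNode)
  | .nil => []
  | .cons value sub_node rest => (value.1, sub_node) :: childPairs rest

-- one step of the descent: expand the dict nodes of the frontier, drop list nodes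
def expandB (frontier : List (String × PNode)) : List (String × PNode) :=
  frontier.foldl (fun acc p =>
    match p.2 with
    | .dct es => acc ++ childPairs es
    | .lst _ => acc) []

-- the `while frontier and depth < level` loop, counting down the remaining depth as fuel
def descendB (frontier : List (String × PNode)) : Nat → List (String × PNode)
  | 0 => frontier
  | n + 1 => if frontier.isEmpty then frontier else descendB (expandB frontier) n

def get_account_type_value_at_level_alt (level : Int) : List (String × List String) :=
  if level < 0 then []
  else
    let frontier := descendB [("", hierarchy)] level.toNat
    (frontier.foldl (fun res p =>
      let values := headsB p.2
      if values.isEmpty then res else res.insert p.1 values) PySem.Dict.empty).items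

-- ===== PRECONDITION & SPEC =====
-- Pre_ excludes level = 0, on which Python A returns a dict keyed by None — a key that is
-- not a String, so the value leaves the declared return type List (String × List String).
def Pre_get_account_type_value_at_level (level : Int) : Prop := level ≠ 0
instance (level : Int) : Decidable (Pre_get_account_type_value_at_level level) := by unfold Pre_get_account_type_value_at_level; infer_instance
def pvWitness_get_account_type_value_at_level : Int := 1

def Spec_get_account_type_value_at_level (level : Int) (out : List (String × List String)) : Prop := out = get_account_type_value_at_level_alt level
instance (level : Int) (out : List (String × List String)) : Decidable (Spec_get_account_type_value_at_level level out) := by unfold Spec_get_account_type_value_at_level; infer_instance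

-- ===== CLAIM (what is proved, stated in full; the proofs are below) =====
def Claim_equal_get_account_type_value_at_level : Prop := ∀ (level : Int), Dom_get_account_type_value_at_level level → Pre_get_account_type_value_at_level level → Spec_get_account_type_value_at_level level (get_account_type_value_at_level level)

-- ===== LEMMAS AND PROOFS =====

-- A returns the empty dict on every level other than 0, 1, 2.
theorem iterateA_other (level : Int) (h0 : level ≠ 0) (h1 : level ≠ 1) (h2 : level ≠ 2) :
    get_account_type_value_at_level level = [] := by
  simp [get_account_type_value_at_level, hierarchy, assetNode, iterateA, iterateAEntries,
    Ne.symm h0, Ne.symm h1, Ne.symm h2, PySem.Dict.empty]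

theorem descendB_nil (n : Nat) : descendB [] n = [] := by
  cases n <;> simp [descendB]

-- B returns the empty dict on every level ≥ 3: three expansions exhaust the hierarchy.
theorem descendB_big (m : Nat) : descendB [("", hierarchy)] (m + 3) = [] := by
  simp only [descendB]
  norm_num [expandB, childPairs, hierarchy, assetNode, descendB_nil]

theorem altB_big (level : Int) (h : 3 ≤ level) :
    get_account_type_value_at_level_alt level = [] := by
  unfold get_account_type_value_at_level_alt
  rw [if_neg (by omega)]
  rw [show level.toNat = (level.toNat - 3) + 3 by omega, descendB_big]
  rfl

theorem altB_neg (level : Int) (h : level < 0) :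
    get_account_type_value_at_level_alt level = [] := by
  unfold get_account_type_value_at_level_alt
  rw [if_pos h]

-- ===== VERDICT (by name: the statement is the Claim_ definition above) =====
theorem get_account_type_value_at_level_spec : Claim_equal_get_account_type_value_at_level := by
  intro level _ hpre
  unfold Pre_get_account_type_value_at_level at hpre
  unfold Spec_get_account_type_value_at_level
  by_cases h1 : level = 1
  · subst h1; decide
  · by_cases h2 : level = 2
    · subst h2; decide
    · by_cases hneg : level < 0
      · rw [iterateA_other level hpre h1 h2, altB_neg level hneg]
      · rw [iterateA_other level hpre h1 h2, altB_big level (by omega)]
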